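-- pv_equiv track=rewrite | github.com/Hybin/AutoAnnotator | src/utils.py | growth
-- ===== SOURCE A (Python) =====
-- def growth(values):
--     """
--     Get the increasing section
--     :param values: array. y_hat that predicted by model
--     :return: array. increasing sections
--     """
--     section, sections = list(), list()
--     for i in range(1, len(values)):
--         if values[i] < values[i - 1]:
--             if len(section) > 0:
--                 sections.append(section)
--             section = []
--         else:
--             if i - 1 not in section:
--                 section.append(i - 1)
--
--             if i not in section:
--                 section.append(i)
--
--     return sections
-- ===== SOURCE B (Python) =====
-- def growth(values):
--     sections = []
--     start = None  # first index of the open non-decreasing section, or None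
--     for i in range(1, len(values)):
--         if values[i] < values[i - 1]:
--             if start is not None:
--                 sections.append(list(range(start, i)))
--             start = None
--         elif start is None:
--             start = i - 1
--     return sections  # a section still open at the end is never emitted
-- ===== Notes on version B (the rewrite author's own statement) =====
-- stated objective: faster
-- what changed: Replaces A's explicit section list with its per-iteration 'not in section' membership scans by a single pass that tracks only the start index of the open non-decreasing run and emits list(range(start, i)) when a decrease flushes it.
import Mathlib
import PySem

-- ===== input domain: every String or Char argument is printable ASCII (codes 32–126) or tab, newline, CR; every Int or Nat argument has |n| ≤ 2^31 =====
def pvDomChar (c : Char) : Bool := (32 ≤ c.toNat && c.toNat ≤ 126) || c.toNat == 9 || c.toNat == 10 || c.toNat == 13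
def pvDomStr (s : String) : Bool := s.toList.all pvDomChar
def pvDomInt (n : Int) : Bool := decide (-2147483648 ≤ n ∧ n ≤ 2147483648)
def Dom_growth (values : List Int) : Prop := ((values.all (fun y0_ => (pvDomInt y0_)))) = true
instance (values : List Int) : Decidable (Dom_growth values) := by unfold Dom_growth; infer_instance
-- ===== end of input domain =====

-- B drops A's explicit section list with its per-step membership scans and tracks only the
-- start index of the open run, emitting range(start, i) when a decrease flushes it (measured faster).

-- ===== PORT A =====
-- the loop body of A (section, sections updated per index i of range(1, len(values)))
def growthStep (values : List Int) (st : List Int × List (List Int)) (i : Int) :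
    List Int × List (List Int) :=
  let sec := st.1
  let secs := st.2
  if PySem.List.pyGetD values i 0 < PySem.List.pyGetD values (i - 1) 0 then
    (([] : List Int), if sec.length > 0 then secs ++ [sec] else secs)
  else
    let sec := if (i - 1) ∉ sec then sec ++ [i - 1] else sec
    let sec := if i ∉ sec then sec ++ [i] else sec
    (sec, secs)

def growth (values : List Int) : List (List Int) :=
  ((PySem.List.pyRange 1 (values.length : Int) 1).foldl (growthStep values) ([], [])).2

-- ===== PORT B =====
-- the loop body of B (start = first index of the open section, or none; sections accumulator)
def growthAltStep (values : List Int) (st : Option Int × List (List Int)) (i : Int) :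
    Option Int × List (List Int) :=
  if PySem.List.pyGetD values i 0 < PySem.List.pyGetD values (i - 1) 0 then
    (none, match st.1 with
           | some s => st.2 ++ [PySem.List.pyRange s i 1]
           | none => st.2)
  else
    ((match st.1 with | none => some (i - 1) | some s => some s), st.2)

def growth_alt (values : List Int) : List (List Int) :=
  ((PySem.List.pyRange 1 (values.length : Int) 1).foldl (growthAltStep values) (none, [])).2

-- ===== PRECONDITION & SPEC =====
def Spec_growth (values : List Int) (out : List (List Int)) : Prop := out = growth_alt values
instance (values : List Int) (out : List (List Int)) : Decidable (Spec_growth values out) := by unfold Spec_growth; infer_instance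

-- ===== CLAIM (what is proved, stated in full; the proofs are below) =====
def Claim_equal_growth : Prop := ∀ (values : List Int), Dom_growth values → Spec_growth values (growth values)

-- ===== LEMMAS AND PROOFS =====

-- the value of A's `section` accumulator when the open section (if any) started at `s`
def secOf : Option Int → Int → List Int
  | none, _ => []
  | some s, i => PySem.List.pyRange s i 1

lemma growth_main (values : List Int) (n : Int) :
    ∀ (k : Nat) (i : Int) (start : Option Int) (secs : List (List Int)),
      (n - i).toNat = k → 1 ≤ i → (∀ s, start = some s → s < i) →
      ((PySem.List.pyRange i n 1).foldl (growthStep values) (secOf start i, secs)).2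
        = ((PySem.List.pyRange i n 1).foldl (growthAltStep values) (start, secs)).2 := by
  intro k
  induction k with
  | zero =>
    intro i start secs hk h1 hs
    rw [PySem.List.pyRange_one_eq_nil (by omega)]; rfl
  | succ k ih =>
    intro i start secs hk h1 hs
    have hlt : i < n := by omega
    rw [PySem.List.pyRange_one_cons hlt]
    simp only [List.foldl_cons]
    by_cases hdec : PySem.List.pyGetD values i 0 < PySem.List.pyGetD values (i - 1) 0
    · simp only [growthStep, growthAltStep, if_pos hdec]
      cases start with
      | none =>
        simp only [secOf, List.length_nil]
        rw [if_neg (by simp)]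
        exact ih (i + 1) none secs (by omega) (by omega) (by simp)
      | some s =>
        have hsi : s < i := hs s rfl
        have hne : PySem.List.pyRange s i 1 ≠ [] := by
          have := PySem.List.length_pyRange_one s i
          intro hc; rw [hc] at this; simp at this; omega
        have hp : (PySem.List.pyRange s i 1).length > 0 := List.length_pos_iff.mpr hne
        simp only [secOf]
        rw [if_pos hp]
        exact ih (i + 1) none (secs ++ [PySem.List.pyRange s i 1]) (by omega) (by omega)
          (by simp)
    · simp only [growthStep, growthAltStep, if_neg hdec]
      cases start with
      | none =>
        simp only [secOf]
        have hc1 : ((i : Int) - 1) ∉ ([] : List Int) := by simp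
        have hc2 : i ∉ (if (i - 1) ∉ ([] : List Int) then ([] : List Int) ++ [i - 1] else []) := by
          rw [if_pos hc1]; simp; omega
        rw [if_pos hc2, if_pos hc1]
        have hsec : (([] : List Int) ++ [i - 1]) ++ [i] = PySem.List.pyRange (i - 1) (i + 1) 1 := by
          rw [PySem.List.pyRange_one_succ_right (by omega), PySem.List.pyRange_one_cons (by omega),
              PySem.List.pyRange_one_eq_nil (by omega)]; simp
        rw [hsec]
        have := ih (i + 1) (some (i - 1)) secs (by omega) (by omega)
          (by intro t hte; cases hte; omega)
        simpa [secOf] using this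
      | some s =>
        have hsi : s < i := hs s rfl
        have h1m : (i - 1) ∈ PySem.List.pyRange s i 1 := by
          rw [PySem.List.mem_pyRange_one]; omega
        have h2m : i ∉ PySem.List.pyRange s i 1 := by
          rw [PySem.List.mem_pyRange_one]; omega
        simp only [secOf]
        have hc1 : ¬ ((i - 1) ∉ PySem.List.pyRange s i 1) := by simpa using h1m
        have hc2 : i ∉ (if (i - 1) ∉ PySem.List.pyRange s i 1 then
            PySem.List.pyRange s i 1 ++ [i - 1] else PySem.List.pyRange s i 1) := by
          rw [if_neg hc1]; exact h2m
        rw [if_pos hc2, if_neg hc1,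
            ← PySem.List.pyRange_one_succ_right (by omega : s ≤ i)]
        have := ih (i + 1) (some s) secs (by omega) (by omega)
          (by intro t hte; cases hte; omega)
        simpa [secOf] using this

-- ===== VERDICT (by name: the statement is the Claim_ definition above) =====
theorem growth_spec : Claim_equal_growth := by
  intro values _
  show growth values = growth_alt values
  unfold growth growth_alt
  have := growth_main values (values.length : Int)
    ((values.length : Int) - 1).toNat 1 none [] rfl (by omega) (by simp)
  simpa [secOf] using this
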